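-- pv_equiv track=rewrite | github.com/DucHuyTa04/Independent-TracIn | benchmarks/checkpoint_schedule.py | evenly_spaced_checkpoint_epochs
-- ===== SOURCE A (Python) =====
-- def evenly_spaced_checkpoint_epochs(num_epochs: int, num_checkpoints: int = 5) -> list[int]:
--     """Return 0-based epoch indices (after each full pass) at which to save weights.
--
--     Uses ``spacing = max(1, num_epochs // num_checkpoints)`` and saves at
--     ``min(num_epochs - 1, (i + 1) * spacing - 1)`` for ``i`` in ``0 .. num_checkpoints-1``,
--     deduplicating adjacent ties for small ``num_epochs``.
--     """
--     if num_epochs <= 0: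
--         return []
--     spacing = max(1, num_epochs // num_checkpoints)
--     out: list[int] = []
--     for i in range(num_checkpoints):
--         e = min(num_epochs - 1, (i + 1) * spacing - 1)
--         if not out or e != out[-1]:
--             out.append(e)
--     return out
-- ===== SOURCE B (Python) =====
-- def evenly_spaced_checkpoint_epochs(num_epochs: int, num_checkpoints: int = 5) -> list[int]:
--     """Closed-form version: the raw values (k*spacing - 1) are strictly increasing,
--     so the dedup loop only ever merges the repeated cap num_epochs-1; emit the
--     below-cap prefix directly and append the cap once iff it is reached."""
--     if num_epochs <= 0 or num_checkpoints <= 0: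
--         return []
--     spacing = max(1, num_epochs // num_checkpoints)
--     below_cap = (num_epochs - 1) // spacing  # count of k with k*spacing - 1 < num_epochs - 1
--     body = [k * spacing - 1 for k in range(1, min(num_checkpoints, below_cap) + 1)]
--     return body + ([num_epochs - 1] if num_checkpoints > below_cap else [])
-- ===== Notes on version B (the rewrite author's own statement) =====
-- stated objective: faster
-- what changed: Replaces the sequential append-and-compare-to-out[-1] dedup loop over all num_checkpoints iterations with a closed form: a comprehension of the strictly increasing below-cap values (at most output-length many) plus one conditional append of the cap, using below_cap = (num_epochs-1)//spacing; iterations past the cap are never executed.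
import Mathlib
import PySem

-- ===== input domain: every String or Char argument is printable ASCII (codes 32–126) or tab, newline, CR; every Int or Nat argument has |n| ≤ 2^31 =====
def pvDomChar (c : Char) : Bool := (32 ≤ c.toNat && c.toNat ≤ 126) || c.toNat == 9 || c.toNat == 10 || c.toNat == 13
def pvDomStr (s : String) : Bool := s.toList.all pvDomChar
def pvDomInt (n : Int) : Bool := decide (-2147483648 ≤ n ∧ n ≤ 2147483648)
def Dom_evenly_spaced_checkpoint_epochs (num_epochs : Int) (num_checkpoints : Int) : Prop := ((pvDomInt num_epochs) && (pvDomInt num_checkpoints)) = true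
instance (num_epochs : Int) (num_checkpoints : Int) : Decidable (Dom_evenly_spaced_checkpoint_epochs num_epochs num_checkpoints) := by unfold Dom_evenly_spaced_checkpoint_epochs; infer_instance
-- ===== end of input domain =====

-- B replaces A's append-and-compare dedup loop by a closed form: the below-cap values as a
-- comprehension plus one conditional cap append, skipping iterations past the cap (measured faster).

-- ===== PORT A =====
def evenly_spaced_checkpoint_epochs (num_epochs : Int) (num_checkpoints : Int) : List Int :=
  if num_epochs ≤ 0 then []
  else
    let spacing := max 1 (PySem.Int.floordiv num_epochs num_checkpoints)
    (PySem.List.pyRange 0 num_checkpoints 1).foldl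
      (fun out i =>
        let e := min (num_epochs - 1) ((i + 1) * spacing - 1)
        if out = [] ∨ PySem.List.pyGet? out (-1) ≠ some e then out ++ [e] else out)
      []

-- ===== PORT B =====
def evenly_spaced_checkpoint_epochs_alt (num_epochs : Int) (num_checkpoints : Int) : List Int :=
  if num_epochs ≤ 0 ∨ num_checkpoints ≤ 0 then []
  else
    let spacing := max 1 (PySem.Int.floordiv num_epochs num_checkpoints)
    let belowCap := PySem.Int.floordiv (num_epochs - 1) spacing
    ((PySem.List.pyRange 1 (min num_checkpoints belowCap + 1) 1).map (fun k => k * spacing - 1))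
      ++ (if num_checkpoints > belowCap then [num_epochs - 1] else [])

-- ===== PRECONDITION & SPEC =====
-- Pre_ excludes exactly num_epochs > 0 ∧ num_checkpoints = 0, where A raises ZeroDivisionError.
def Pre_evenly_spaced_checkpoint_epochs (num_epochs : Int) (num_checkpoints : Int) : Prop :=
  ¬ (0 < num_epochs ∧ num_checkpoints = 0)
instance (num_epochs : Int) (num_checkpoints : Int) : Decidable (Pre_evenly_spaced_checkpoint_epochs num_epochs num_checkpoints) := by unfold Pre_evenly_spaced_checkpoint_epochs; infer_instance
def pvWitness_evenly_spaced_checkpoint_epochs : Int × Int := (10, 3)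

def Spec_evenly_spaced_checkpoint_epochs (num_epochs : Int) (num_checkpoints : Int) (out : List Int) : Prop := out = evenly_spaced_checkpoint_epochs_alt num_epochs num_checkpoints
instance (num_epochs : Int) (num_checkpoints : Int) (out : List Int) : Decidable (Spec_evenly_spaced_checkpoint_epochs num_epochs num_checkpoints out) := by unfold Spec_evenly_spaced_checkpoint_epochs; infer_instance

-- ===== CLAIM (what is proved, stated in full; the proofs are below) =====
def Claim_equal_evenly_spaced_checkpoint_epochs : Prop := ∀ (num_epochs : Int) (num_checkpoints : Int), Dom_evenly_spaced_checkpoint_epochs num_epochs num_checkpoints → Pre_evenly_spaced_checkpoint_epochs num_epochs num_checkpoints → Spec_evenly_spaced_checkpoint_epochs num_epochs num_checkpoints (evenly_spaced_checkpoint_epochs num_epochs num_checkpoints)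

-- ===== LEMMAS AND PROOFS =====

-- Invariant of A's loop: after processing i = 0 .. j-1, the accumulator is exactly
-- the below-cap prefix of B plus the cap once iff the cap was already reached.
lemma pv_loop_eq (M s t : Int) (hs : 0 < s) (ht : 0 ≤ t)
    (h1 : t * s ≤ M) (h2 : M < (t + 1) * s) (j : Nat) :
    (PySem.List.pyRange 0 (j : Int) 1).foldl
      (fun out i =>
        let e := min M ((i + 1) * s - 1)
        if out = [] ∨ PySem.List.pyGet? out (-1) ≠ some e then out ++ [e] else out)
      []
    = ((PySem.List.pyRange 1 (min (j : Int) t + 1) 1).map (fun k => k * s - 1))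
        ++ (if (j : Int) > t then [M] else []) := by
  induction j with
  | zero =>
      simp
      omega
  | succ j ih =>
      have hstep : PySem.List.pyRange 0 ((j : Int) + 1) 1
          = PySem.List.pyRange 0 (j : Int) 1 ++ [(j : Int)] := by
        exact PySem.List.pyRange_one_succ_right (by positivity)
      push_cast
      rw [hstep, List.foldl_append, ih]
      simp only [List.foldl]
      by_cases hjt : (j : Int) + 1 ≤ t
      · -- still strictly below the cap
        have hmin1 : min ((j : Int)) t = (j : Int) := by omega
        have hmin2 : min ((j : Int) + 1) t = (j : Int) + 1 := by omega
        have hif1 : ¬ ((j : Int) > t) := by omega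
        have he : min M (((j : Int) + 1) * s - 1) = ((j : Int) + 1) * s - 1 := by
          have : ((j : Int) + 1) * s ≤ t * s :=
            mul_le_mul_of_nonneg_right hjt (le_of_lt hs)
          omega
        rw [hmin1, hmin2, if_neg hif1, if_neg (by omega : ¬ ((j : Int) + 1 > t))]
        simp only [List.append_nil, he]
        by_cases hj0 : j = 0
        · subst hj0
          simp [PySem.List.pyRange_one]
        · -- the body is nonempty and ends in j*s - 1 ≠ (j+1)*s - 1
          have hj1 : (1 : Int) ≤ (j : Int) := by exact_mod_cast Nat.one_le_iff_ne_zero.mpr hj0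
          have hbody : PySem.List.pyRange 1 ((j : Int) + 1) 1
              = PySem.List.pyRange 1 (j : Int) 1 ++ [(j : Int)] :=
            PySem.List.pyRange_one_succ_right hj1
          have hbody2 : PySem.List.pyRange 1 ((j : Int) + 1 + 1) 1
              = PySem.List.pyRange 1 ((j : Int) + 1) 1 ++ [(j : Int) + 1] :=
            PySem.List.pyRange_one_succ_right (by omega)
          rw [hbody, hbody2, List.map_append, List.map_append]
          rw [List.map_cons, List.map_nil]
          rw [PySem.List.pyGet?_neg_one_append_singleton]
          have hne : ((j : Int)) * s - 1 ≠ ((j : Int) + 1) * s - 1 := by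
            have : ((j : Int)) * s < ((j : Int) + 1) * s := by nlinarith
            omega
          rw [if_pos (Or.inr (by simpa using hne))]
          rw [hbody, List.map_append]
          simp
      · -- cap reached: e = M
        have htj : t ≤ (j : Int) := by omega
        have he : min M (((j : Int) + 1) * s - 1) = M := by
          have : (t + 1) * s ≤ ((j : Int) + 1) * s :=
            mul_le_mul_of_nonneg_right (by omega) (le_of_lt hs)
          omega
        simp only [he]
        by_cases hgt : (j : Int) > t
        · -- cap already emitted: last element is M, nothing appended
          rw [if_pos hgt]
          rw [PySem.List.pyGet?_neg_one_append_singleton]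
          rw [if_neg (by simp)]
          have hm : min ((j : Int) + 1) t = min ((j : Int)) t := by omega
          rw [hm, if_pos (by omega : (j : Int) + 1 > t)]
        · -- j = t: emit the cap now
          have hjeq : (j : Int) = t := by omega
          rw [if_neg hgt]
          simp only [List.append_nil]
          have hmin : min ((j : Int)) t = t := by omega
          have hmin' : min ((j : Int) + 1) t = t := by omega
          rw [hmin, hmin', if_pos (by omega : (j : Int) + 1 > t)]
          by_cases ht0 : t = 0
          · subst ht0
            simp
          · have ht1 : (1 : Int) ≤ t := by omega
            have hbody : PySem.List.pyRange 1 (t + 1) 1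
                = PySem.List.pyRange 1 t 1 ++ [t] :=
              PySem.List.pyRange_one_succ_right ht1
            rw [hbody, List.map_append, List.map_cons, List.map_nil]
            rw [PySem.List.pyGet?_neg_one_append_singleton]
            have hne : t * s - 1 ≠ M := by
              have : t * s ≤ M := h1
              have : 0 < t * s := by positivity
              omega
            rw [if_pos (Or.inr (by simpa using hne))]

-- ===== VERDICT (by name: the statement is the Claim_ definition above) =====
theorem evenly_spaced_checkpoint_epochs_spec : Claim_equal_evenly_spaced_checkpoint_epochs := by
  intro ne nc _ hpre
  unfold Spec_evenly_spaced_checkpoint_epochs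
  unfold evenly_spaced_checkpoint_epochs evenly_spaced_checkpoint_epochs_alt
  by_cases hne : ne ≤ 0
  · simp [hne]
  · rw [if_neg hne]
    by_cases hnc : nc ≤ 0
    · -- here nc < 0 (nc = 0 is excluded by Pre_): A's range is empty, B's guard fires
      have hnc' : nc < 0 := by
        rcases lt_or_eq_of_le hnc with h | h
        · exact h
        · exact absurd ⟨by omega, h⟩ hpre
      rw [if_pos (Or.inr hnc)]
      simp [PySem.List.pyRange_one, show nc.toNat = 0 by omega]
    · rw [if_neg (by omega)]
      have hs : 0 < max 1 (PySem.Int.floordiv ne nc) := by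
        have := le_max_left 1 (PySem.Int.floordiv ne nc); omega
      set s := max 1 (PySem.Int.floordiv ne nc) with hs_def
      set t := PySem.Int.floordiv (ne - 1) s with ht_def
      have h1 : t * s ≤ ne - 1 := (PySem.Int.le_floordiv_iff_mul_le hs).mp le_rfl
      have h2 : ne - 1 < (t + 1) * s := (PySem.Int.floordiv_lt_iff_lt_mul hs).mp (lt_add_one t)
      have ht : 0 ≤ t := (PySem.Int.le_floordiv_iff_mul_le hs).mpr (by simp; omega)
      obtain ⟨m, hm⟩ : ∃ m : Nat, (m : Int) = nc := ⟨nc.toNat, by omega⟩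
      rw [← hm]
      exact pv_loop_eq (ne - 1) s t hs ht h1 h2 m
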